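-- pv_equiv track=rewrite | github.com/abhiramvenugopal/vscode | Spoj_test/Roy.py | checkSymetric
-- ===== SOURCE A (Python) =====
-- def checkSymetric(matrix,n):
--     s={}
--     for i in range(((n-1)//2)+1):
--         for j in range(((n-1)//2)+1):
--             if matrix[i][j]==1:
--                 s[(i,j)]="item"
--                 s[(n-1-i,j)]="item"
--                 s[(i,n-1-j)]="item"
--                 s[(n-1-i,n-1-j)]="item"
--     for i in range(n):
--         for j in range(n):
--             if (matrix[i][j]==0 and (i,j) in s) or (matrix[i][j]==1 and (i,j) not in s):
--                 return "NO"
--     return "YES"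
-- ===== SOURCE B (Python) =====
-- def checkSymetric(matrix, n):
--     # One pass: each cell must equal-1 exactly when its quadrant
--     # representative cell equals 1 (values other than 0/1 only count via ==1/==0 tests).
--     for i in range(n):
--         for j in range(n):
--             ri = min(i, n - 1 - i)
--             rj = min(j, n - 1 - j)
--             want = matrix[ri][rj] == 1
--             if (matrix[i][j] == 0 and want) or (matrix[i][j] == 1 and not want):
--                 return "NO"
--     return "YES"
-- ===== Notes on version B (the rewrite author's own statement) =====
-- stated objective: simpler
-- what changed: B drops A's build-a-dict-of-marked-cells phase entirely and does a single double loop, comparing each cell's ==1/==0 status directly against its quadrant representative cell matrix[min(i,n-1-i)][min(j,n-1-j)].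
import Mathlib
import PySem

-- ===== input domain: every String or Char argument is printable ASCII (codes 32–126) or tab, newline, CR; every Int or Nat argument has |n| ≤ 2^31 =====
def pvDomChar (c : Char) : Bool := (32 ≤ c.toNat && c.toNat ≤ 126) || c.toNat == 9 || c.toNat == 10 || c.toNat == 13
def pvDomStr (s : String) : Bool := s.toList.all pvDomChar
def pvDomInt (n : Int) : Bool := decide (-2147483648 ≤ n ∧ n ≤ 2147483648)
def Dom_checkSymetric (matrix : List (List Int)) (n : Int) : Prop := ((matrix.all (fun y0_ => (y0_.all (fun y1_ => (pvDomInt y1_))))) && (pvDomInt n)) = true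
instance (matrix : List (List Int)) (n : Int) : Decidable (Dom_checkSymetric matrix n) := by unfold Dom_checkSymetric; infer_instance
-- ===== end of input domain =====

-- B replaces A's dict-building pass by a direct comparison of each cell with its
-- quadrant representative cell (simpler, one pass); return values proved equal under Pre_.

-- matrix[i][j]; the defaults are never reached under Pre_ (all accessed indices in range)
def pvCell (matrix : List (List Int)) (i j : Int) : Int :=
  PySem.List.pyGetD (PySem.List.pyGetD matrix i []) j 0

-- ===== PORT A =====
-- first phase of A: build the dict s of the four mirror images of every quadrant cell equal to 1
def pvBuildS (matrix : List (List Int)) (n : Int) : PySem.Dict (Int × Int) String :=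
  (PySem.List.pyRange 0 (PySem.Int.floordiv (n-1) 2 + 1) 1).foldl (fun s i =>
    (PySem.List.pyRange 0 (PySem.Int.floordiv (n-1) 2 + 1) 1).foldl (fun s j =>
      if pvCell matrix i j == 1 then
        ((((s.insert (i, j) "item").insert (n-1-i, j) "item").insert
            (i, n-1-j) "item").insert (n-1-i, n-1-j) "item")
      else s) s) PySem.Dict.empty

def checkSymetric (matrix : List (List Int)) (n : Int) : String :=
  -- s := pvBuildS matrix n; then the early-return validation loop, rendered as List.any
  if (PySem.List.pyRange 0 n 1).any (fun i =>
       (PySem.List.pyRange 0 n 1).any (fun j =>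
         (pvCell matrix i j == 0 && (pvBuildS matrix n).contains (i, j)) ||
         (pvCell matrix i j == 1 && !(pvBuildS matrix n).contains (i, j))))
  then "NO" else "YES"

-- ===== PORT B =====
def checkSymetric_alt (matrix : List (List Int)) (n : Int) : String :=
  if (PySem.List.pyRange 0 n 1).any (fun i =>
       (PySem.List.pyRange 0 n 1).any (fun j =>
         let w := pvCell matrix (min i (n-1-i)) (min j (n-1-j)) == 1
         (pvCell matrix i j == 0 && w) || (pvCell matrix i j == 1 && !w)))
  then "NO" else "YES"

-- ===== PRECONDITION & SPEC =====
-- Pre_ excludes inputs on which Python A raises IndexError: it requires every cell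
-- matrix[i][j] with 0 ≤ i,j < n to exist. (On some ragged matrices A happens to
-- return "NO" before reaching the short row; these evaluation-order accidents are
-- excluded too — A raises on that shape of input in general.)
def Pre_checkSymetric (matrix : List (List Int)) (n : Int) : Prop :=
  n ≤ (matrix.length : Int) ∧ ∀ row ∈ matrix.take n.toNat, n ≤ (row.length : Int)
instance (matrix : List (List Int)) (n : Int) : Decidable (Pre_checkSymetric matrix n) := by
  unfold Pre_checkSymetric; infer_instance

def pvWitness_checkSymetric : List (List Int) × Int := ([[1, 0], [0, 1]], 2)

def Spec_checkSymetric (matrix : List (List Int)) (n : Int) (out : String) : Prop := out = checkSymetric_alt matrix n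
instance (matrix : List (List Int)) (n : Int) (out : String) : Decidable (Spec_checkSymetric matrix n out) := by unfold Spec_checkSymetric; infer_instance

-- ===== CLAIM (what is proved, stated in full; the proofs are below) =====
def Claim_equal_checkSymetric : Prop := ∀ (matrix : List (List Int)) (n : Int), Dom_checkSymetric matrix n → Pre_checkSymetric matrix n → Spec_checkSymetric matrix n (checkSymetric matrix n)

-- ===== LEMMAS AND PROOFS =====

-- does dict key k hit one of the four mirror images of quadrant cell (i,j)?
def pvHit (n : Int) (k : Int × Int) (i j : Int) : Bool :=
  k == ((i, j) : Int × Int) || k == ((n-1-i, j) : Int × Int) ||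
  k == ((i, n-1-j) : Int × Int) || k == ((n-1-i, n-1-j) : Int × Int)

theorem contains_ins4 (s : PySem.Dict (Int × Int) String) (n i j : Int) (k : Int × Int) :
    (((((s.insert (i, j) "item").insert (n-1-i, j) "item").insert
        (i, n-1-j) "item").insert (n-1-i, n-1-j) "item").contains k)
    = (pvHit n k i j || s.contains k) := by
  simp only [PySem.Dict.contains_insert, pvHit]
  simp [Bool.or_comm, Bool.or_assoc, Bool.or_left_comm]

theorem contains_inner (matrix : List (List Int)) (n i : Int) (js : List Int)
    (d : PySem.Dict (Int × Int) String) (k : Int × Int) :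
    ((js.foldl (fun s j =>
        if pvCell matrix i j == 1 then
          ((((s.insert (i, j) "item").insert (n-1-i, j) "item").insert
              (i, n-1-j) "item").insert (n-1-i, n-1-j) "item")
        else s) d).contains k)
    = (d.contains k || js.any (fun j => pvCell matrix i j == 1 && pvHit n k i j)) := by
  induction js generalizing d with
  | nil => simp
  | cons j js ih =>
    simp only [List.foldl_cons, List.any_cons, ih]
    split
    · rename_i h
      rw [contains_ins4]
      simp [h, Bool.or_assoc, Bool.or_left_comm]
    · rename_i h
      simp [h]

theorem contains_outer (matrix : List (List Int)) (n : Int) (is : List Int)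
    (d : PySem.Dict (Int × Int) String) (k : Int × Int) :
    ((is.foldl (fun s i =>
        (PySem.List.pyRange 0 (PySem.Int.floordiv (n-1) 2 + 1) 1).foldl (fun s j =>
          if pvCell matrix i j == 1 then
            ((((s.insert (i, j) "item").insert (n-1-i, j) "item").insert
                (i, n-1-j) "item").insert (n-1-i, n-1-j) "item")
          else s) s) d).contains k)
    = (d.contains k || is.any (fun i =>
        (PySem.List.pyRange 0 (PySem.Int.floordiv (n-1) 2 + 1) 1).any (fun j =>
          pvCell matrix i j == 1 && pvHit n k i j))) := by
  induction is generalizing d with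
  | nil => simp
  | cons i is ih =>
    simp only [List.foldl_cons, List.any_cons, ih, contains_inner]
    rw [Bool.or_assoc]

theorem contains_build (matrix : List (List Int)) (n : Int) (k : Int × Int) :
    ((pvBuildS matrix n).contains k)
    = ((PySem.List.pyRange 0 (PySem.Int.floordiv (n-1) 2 + 1) 1).any (fun i =>
        (PySem.List.pyRange 0 (PySem.Int.floordiv (n-1) 2 + 1) 1).any (fun j =>
          pvCell matrix i j == 1 && pvHit n k i j))) := by
  unfold pvBuildS
  rw [contains_outer]
  rfl

-- key lemma: for a cell (a,b) of the matrix, membership in A's dict equals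
-- "the quadrant representative cell equals 1"
theorem contains_eq_rep (matrix : List (List Int)) (n a b : Int)
    (ha : 0 ≤ a ∧ a < n) (hb : 0 ≤ b ∧ b < n) :
    ((pvBuildS matrix n).contains (a, b))
    = (pvCell matrix (min a (n-1-a)) (min b (n-1-b)) == 1) := by
  rw [contains_build, PySem.Int.floordiv_eq_ediv_of_pos (by omega : (0:Int) < 2)]
  rw [Bool.eq_iff_iff]
  simp only [List.any_eq_true, PySem.List.mem_pyRange_one, Bool.and_eq_true, beq_iff_eq,
    pvHit, Bool.or_eq_true, Prod.mk.injEq]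
  constructor
  · rintro ⟨i, ⟨hi0, hiq⟩, j, ⟨hj0, hjq⟩, hc, hhit⟩
    rcases hhit with (⟨⟨ha', hb'⟩ | ⟨ha', hb'⟩⟩ | ⟨ha', hb'⟩) | ⟨ha', hb'⟩ <;>
    · have hmi : min a (n-1-a) = i := by omega
      have hmj : min b (n-1-b) = j := by omega
      rw [hmi, hmj]; exact hc
  · intro hc
    refine ⟨min a (n-1-a), ⟨by omega, by omega⟩, min b (n-1-b), ⟨by omega, by omega⟩, hc, ?_⟩
    omega

-- pointwise equality of the two validation conditions
theorem cond_eq (matrix : List (List Int)) (n : Int) :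
    ((PySem.List.pyRange 0 n 1).any (fun i =>
       (PySem.List.pyRange 0 n 1).any (fun j =>
         (pvCell matrix i j == 0 && (pvBuildS matrix n).contains (i, j)) ||
         (pvCell matrix i j == 1 && !(pvBuildS matrix n).contains (i, j)))))
    = ((PySem.List.pyRange 0 n 1).any (fun i =>
       (PySem.List.pyRange 0 n 1).any (fun j =>
         let w := pvCell matrix (min i (n-1-i)) (min j (n-1-j)) == 1
         (pvCell matrix i j == 0 && w) || (pvCell matrix i j == 1 && !w)))) := by
  apply PySem.List.any_congr_mem
  intro i hi
  apply PySem.List.any_congr_mem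
  intro j hj
  rw [PySem.List.mem_pyRange_one] at hi hj
  simp only [contains_eq_rep matrix n i j ⟨hi.1, hi.2⟩ ⟨hj.1, hj.2⟩]

-- ===== VERDICT (by name: the statement is the Claim_ definition above) =====
theorem checkSymetric_spec : Claim_equal_checkSymetric := by
  intro matrix n _ _
  show checkSymetric matrix n = checkSymetric_alt matrix n
  unfold checkSymetric checkSymetric_alt
  rw [cond_eq]
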